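-- pv_equiv track=rewrite | github.com/srijan-singh/Python | Google's Foobar Challenge/level3_part2.py | solution
-- ===== SOURCE A (Python) =====
-- def length_of_edge_list(graph):
--     count = 0
--     for node in graph:
--         for child_node in graph[node]:
--             count+=len(graph[child_node])
--     return count
--
-- def solution(arr):
--
--     length = len(arr)
--
--     graph = {}
--
--     # Creating graph where node is index
--     for node in range(length):
--         graph[node] = []
--
--
--     for node in range(0, length):
--         for index in range(node+1, length):
--             # If condition satisfy it will add edges
--             if arr[index] % arr[node] == 0:
--                 # If graph is empty
--                 if graph[node] == []:
--                     graph[node] = [index]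
--                 else:
--                     graph[node].append(index)
--
--     # The sum of all edge list
--     return length_of_edge_list(graph)
-- ===== SOURCE B (Python) =====
-- def solution(arr):
--     n = len(arr)
--     # dp[j] = number of indices i < j with arr[j] % arr[i] == 0
--     dp = []
--     for j in range(n):
--         c = 0
--         for i in range(j):
--             if arr[j] % arr[i] == 0:
--                 c += 1
--         dp.append(c)
--     total = 0
--     for k in range(n):
--         for j in range(k):
--             if arr[k] % arr[j] == 0:
--                 total += dp[j]
--     return total
-- ===== Notes on version B (the rewrite author's own statement) =====
-- stated objective: simpler
-- what changed: Drops the index-graph dict and edge-list summation entirely: one O(n^2) pass fills dp[j] = number of earlier divisors of arr[j], then a second O(n^2) pass sums dp[j] over all divisibility pairs (j,k), which equals A's sum of child edge-list lengths.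
import Mathlib
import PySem

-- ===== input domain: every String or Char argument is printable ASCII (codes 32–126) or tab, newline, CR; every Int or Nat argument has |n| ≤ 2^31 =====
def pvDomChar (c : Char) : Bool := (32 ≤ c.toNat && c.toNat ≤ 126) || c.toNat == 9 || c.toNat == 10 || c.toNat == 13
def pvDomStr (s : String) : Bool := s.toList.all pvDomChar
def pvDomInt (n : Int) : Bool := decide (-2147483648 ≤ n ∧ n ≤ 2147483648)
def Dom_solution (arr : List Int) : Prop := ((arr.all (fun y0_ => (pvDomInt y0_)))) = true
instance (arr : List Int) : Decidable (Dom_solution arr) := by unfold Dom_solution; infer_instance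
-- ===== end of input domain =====

-- B replaces A's index-graph dict and edge-list-length summation by two plain
-- quadratic passes: dp[j] = number of earlier divisors of arr[j], then the sum
-- of dp[j] over all divisibility pairs (j, k); same return value on Pre_.

-- ===== PORT A =====
-- helper length_of_edge_list: 'for node in graph: for child in graph[node]: count += len(graph[child])'
-- (graph[child] is always a present key at every call site, so getD is exact there)
def length_of_edge_list (graph : PySem.Dict Int (List Int)) : Int :=
  graph.keys.foldl (fun count node =>
    (graph.getD node []).foldl (fun c child =>
      c + PySem.List.len (graph.getD child [])) count) 0

-- indices produced by range(...) are always in range for arr, so pyGetD is exact for arr[...]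
def solution (arr : List Int) : Int :=
  let length : Int := PySem.List.len arr
  let graph : PySem.Dict Int (List Int) :=
    (PySem.List.pyRange 0 length).foldl (fun g node => g.insert node []) PySem.Dict.empty
  let graph :=
    (PySem.List.pyRange 0 length).foldl (fun g node =>
      (PySem.List.pyRange (node + 1) length).foldl (fun g idx =>
        if PySem.Int.mod (PySem.List.pyGetD arr idx 0) (PySem.List.pyGetD arr node 0) = 0 then
          (if g.getD node [] = ([] : List Int) then g.insert node [idx]
           else g.modify node [] (fun l => l ++ [idx]))
        else g) g) graph
  length_of_edge_list graph

-- ===== PORT B =====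
def solution_alt (arr : List Int) : Int :=
  let n : Int := PySem.List.len arr
  let dp : List Int :=
    (PySem.List.pyRange 0 n).foldl (fun dp j =>
      dp ++ [(PySem.List.pyRange 0 j).foldl (fun c i =>
        if PySem.Int.mod (PySem.List.pyGetD arr j 0) (PySem.List.pyGetD arr i 0) = 0 then c + 1
        else c) 0]) []
  (PySem.List.pyRange 0 n).foldl (fun total k =>
    (PySem.List.pyRange 0 k).foldl (fun total j =>
      if PySem.Int.mod (PySem.List.pyGetD arr k 0) (PySem.List.pyGetD arr j 0) = 0 then
        total + PySem.List.pyGetD dp j 0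
      else total) total) 0

-- ===== PRECONDITION & SPEC =====
-- Pre_ excludes exactly the inputs where the Python A raises ZeroDivisionError:
-- a 0 anywhere but at the last position is the divisor of a later '%'.
def Pre_solution (arr : List Int) : Prop := ∀ x ∈ arr.dropLast, x ≠ 0
instance (arr : List Int) : Decidable (Pre_solution arr) := by unfold Pre_solution; infer_instance
def pvWitness_solution : List Int := [2, 4, 8, 3]

def Spec_solution (arr : List Int) (out : Int) : Prop := out = solution_alt arr
instance (arr : List Int) (out : Int) : Decidable (Spec_solution arr out) := by unfold Spec_solution; infer_instance

-- ===== CLAIM (what is proved, stated in full; the proofs are below) =====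
def Claim_equal_solution : Prop := ∀ (arr : List Int), Dom_solution arr → Pre_solution arr → Spec_solution arr (solution arr)

-- ===== LEMMAS AND PROOFS =====

-- the divisibility test both programs perform: arr[idx] % arr[node] == 0
def pvCond (arr : List Int) (node idx : Int) : Bool :=
  decide (PySem.Int.mod (PySem.List.pyGetD arr idx 0) (PySem.List.pyGetD arr node 0) = 0)

-- the edge list A stores at key 'node'
def pvE (arr : List Int) (node : Int) : List Int :=
  (PySem.List.pyRange (node + 1) (PySem.List.len arr)).filter (pvCond arr node)

-- the dp value B stores at index j
def pvDp (arr : List Int) (j : Int) : Int :=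
  ((PySem.List.pyRange 0 j).countP (fun i => pvCond arr i j) : Int)

-- 0/1 weight of the pair (j, k), for the double-counting argument
def pvW (arr : List Int) (j k : Int) : Int :=
  if j < k ∧ pvCond arr j k = true then 1 else 0

-- A's inner building loop appends the filtered indices at key 'node' and touches nothing else
lemma pv_inner (arr : List Int) (node : Int) (l : List Int) (g : PySem.Dict Int (List Int))
    (hc : g.contains node = true) :
    (∀ k, (l.foldl (fun g idx =>
        if PySem.Int.mod (PySem.List.pyGetD arr idx 0) (PySem.List.pyGetD arr node 0) = 0 then
          (if g.getD node [] = ([] : List Int) then g.insert node [idx]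
           else g.modify node [] (fun l => l ++ [idx]))
        else g) g).getD k []
      = if k = node then g.getD node [] ++ l.filter (pvCond arr node) else g.getD k []) ∧
    (l.foldl (fun g idx =>
        if PySem.Int.mod (PySem.List.pyGetD arr idx 0) (PySem.List.pyGetD arr node 0) = 0 then
          (if g.getD node [] = ([] : List Int) then g.insert node [idx]
           else g.modify node [] (fun l => l ++ [idx]))
        else g) g).keys = g.keys := by
  induction l generalizing g with
  | nil => simp
  | cons idx rest ih =>
    simp only [List.foldl_cons]
    by_cases hm : PySem.Int.mod (PySem.List.pyGetD arr idx 0) (PySem.List.pyGetD arr node 0) = 0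
    · rw [if_pos hm]
      by_cases he : g.getD node [] = ([] : List Int)
      · rw [if_pos he]
        have hc' : (g.insert node ([idx] : List Int)).contains node = true := by
          simp
        obtain ⟨h1, h2⟩ := ih (g.insert node [idx]) hc'
        refine ⟨fun k => ?_, by rw [h2, PySem.Dict.keys_insert_of_contains _ _ hc]⟩
        rw [h1 k]
        by_cases hk : k = node
        · subst hk
          simp [he, pvCond, hm]
        · simp [PySem.Dict.getD_insert, hk]
      · rw [if_neg he]
        have hc' : (g.modify node [] (fun l => l ++ [idx])).contains node = true := by
          simp [PySem.Dict.contains_modify]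
        obtain ⟨h1, h2⟩ := ih _ hc'
        refine ⟨fun k => ?_, by rw [h2, PySem.Dict.keys_modify, PySem.Dict.keys_insert_of_contains _ _ hc]⟩
        rw [h1 k]
        by_cases hk : k = node
        · subst hk
          simp [pvCond, hm]
        · simp [PySem.Dict.getD_modify, hk]
    · rw [if_neg hm]
      obtain ⟨h1, h2⟩ := ih g hc
      refine ⟨fun k => ?_, h2⟩
      rw [h1 k]
      have : pvCond arr node idx = false := by simp [pvCond, hm]
      simp [this]

-- A's outer building loop, over distinct keys all initially mapped to []
lemma pv_outer (arr : List Int) (L : List Int) (g : PySem.Dict Int (List Int))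
    (hnd : L.Nodup) (hc : ∀ x ∈ L, g.contains x = true) (h0 : ∀ x ∈ L, g.getD x [] = []) :
    (∀ k, (L.foldl (fun g node =>
        (PySem.List.pyRange (node + 1) (PySem.List.len arr)).foldl (fun g idx =>
          if PySem.Int.mod (PySem.List.pyGetD arr idx 0) (PySem.List.pyGetD arr node 0) = 0 then
            (if g.getD node [] = ([] : List Int) then g.insert node [idx]
             else g.modify node [] (fun l => l ++ [idx]))
          else g) g) g).getD k []
      = if k ∈ L then pvE arr k else g.getD k []) ∧
    (L.foldl (fun g node =>
        (PySem.List.pyRange (node + 1) (PySem.List.len arr)).foldl (fun g idx =>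
          if PySem.Int.mod (PySem.List.pyGetD arr idx 0) (PySem.List.pyGetD arr node 0) = 0 then
            (if g.getD node [] = ([] : List Int) then g.insert node [idx]
             else g.modify node [] (fun l => l ++ [idx]))
          else g) g) g).keys = g.keys := by
  induction L generalizing g with
  | nil => simp
  | cons node rest ih =>
    simp only [List.foldl_cons]
    have hcn : g.contains node = true := hc node (by simp)
    obtain ⟨i1, i2⟩ := pv_inner arr node (PySem.List.pyRange (node + 1) (PySem.List.len arr)) g hcn
    set g1 := (PySem.List.pyRange (node + 1) (PySem.List.len arr)).foldl _ g with hg1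
    have hnd' : rest.Nodup := hnd.of_cons
    have hnode : node ∉ rest := (List.nodup_cons.mp hnd).1
    have hc1 : ∀ x ∈ rest, g1.contains x = true := by
      intro x hx
      rw [PySem.Dict.contains_iff_mem_keys, i2, ← PySem.Dict.contains_iff_mem_keys]
      exact hc x (by simp [hx])
    have h01 : ∀ x ∈ rest, g1.getD x [] = [] := by
      intro x hx
      rw [i1 x, if_neg (by rintro rfl; exact hnode hx)]
      exact h0 x (by simp [hx])
    obtain ⟨o1, o2⟩ := ih g1 hnd' hc1 h01
    refine ⟨fun k => ?_, by rw [o2, i2]⟩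
    rw [o1 k]
    by_cases hk : k ∈ rest
    · simp [hk]
    · rw [if_neg hk, i1 k]
      by_cases hkn : k = node
      · subst hkn
        rw [if_pos rfl, if_pos (by simp), h0 k (by simp), pvE]
        simp
      · simp [hkn, List.mem_cons, hk]

lemma pv_range_nodup (b : Int) : (PySem.List.pyRange 0 b).Nodup := by
  by_cases hb : 0 ≤ b
  · rw [show b = ((b.toNat : Nat) : Int) from (Int.toNat_of_nonneg hb).symm,
        PySem.List.pyRange_zero_natCast]
    exact List.Nodup.map (fun _ _ h => by exact_mod_cast h) List.nodup_range
  · cases hx : PySem.List.pyRange 0 b with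
    | nil => exact List.nodup_nil
    | cons y ys =>
      exact absurd (PySem.List.mem_pyRange_one.mp
        (show y ∈ PySem.List.pyRange 0 b by simp [hx])) (by omega)

-- the initialisation loop 'for node in range(length): graph[node] = []'
lemma pv_graph0 (b : Int) :
    ((PySem.List.pyRange 0 b).foldl (fun g node => g.insert node ([] : List Int)) PySem.Dict.empty).items
      = (PySem.List.pyRange 0 b).map (fun node => (node, ([] : List Int))) := by
  have := PySem.Dict.items_foldl_insert_fresh (PySem.List.pyRange 0 b) (fun a => a)
    (fun _ => ([] : List Int)) PySem.Dict.empty (by intro a _; exact PySem.Dict.contains_empty a)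
    (by simpa using pv_range_nodup b)
  simpa using this

-- A as a nested sum over edge lists
lemma pv_A_sum (arr : List Int) :
    solution arr = ((PySem.List.pyRange 0 (PySem.List.len arr)).map (fun node =>
      ((pvE arr node).map (fun child => PySem.List.len (pvE arr child))).sum)).sum := by
  unfold solution
  dsimp only
  set R := PySem.List.pyRange 0 (PySem.List.len arr) with hR
  have hitems := pv_graph0 (PySem.List.len arr)
  set g0 := R.foldl (fun g node => g.insert node ([] : List Int)) PySem.Dict.empty with hg0
  have hkeys0 : g0.keys = R := by
    simp only [PySem.Dict.keys, hitems, hR]; simp [Function.comp_def]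
  have hnd0 : g0.keys.Nodup := by rw [hkeys0]; exact pv_range_nodup _
  have hc0 : ∀ x ∈ R, g0.contains x = true := by
    intro x hx; rw [PySem.Dict.contains_iff_mem_keys, hkeys0]; exact hx
  have h00 : ∀ x ∈ R, g0.getD x [] = [] := by
    intro x hx
    exact PySem.Dict.getD_of_mem_items g0 (by rw [hitems]; exact List.mem_map_of_mem hx) hnd0 []
  obtain ⟨o1, o2⟩ := pv_outer arr R g0 (pv_range_nodup _) hc0 h00
  unfold length_of_edge_list
  rw [o2, hkeys0]
  have hmem : ∀ (node : Int), node ∈ R → ∀ (child : Int), child ∈ pvE arr node → child ∈ R := by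
    intro node hn child hch
    have h1 := PySem.List.mem_pyRange_one.mp (List.mem_of_mem_filter hch)
    have h2 := PySem.List.mem_pyRange_one.mp hn
    exact PySem.List.mem_pyRange_one.mpr ⟨by omega, h1.2⟩
  rw [PySem.List.foldl_congr_mem R _ (fun count node => count +
        ((pvE arr node).map (fun child => PySem.List.len (pvE arr child))).sum) 0 ?_]
  · rw [PySem.List.foldl_add]; simp
  · intro acc node hn
    rw [o1 node, if_pos hn]
    rw [PySem.List.foldl_congr_mem _ _ (fun c child => c + PySem.List.len (pvE arr child)) acc ?_]
    · rw [PySem.List.foldl_add]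
    · intro c child hch
      rw [o1 child, if_pos (hmem node hn child hch)]

-- B as a nested sum over dp values
lemma pv_B_sum (arr : List Int) :
    solution_alt arr = ((PySem.List.pyRange 0 (PySem.List.len arr)).map (fun k =>
      ((PySem.List.pyRange 0 k).map (fun j =>
        if pvCond arr j k = true then pvDp arr j else 0)).sum)).sum := by
  unfold solution_alt
  dsimp only
  have hdp : ((PySem.List.pyRange 0 (PySem.List.len arr)).foldl (fun dp j =>
      dp ++ [(PySem.List.pyRange 0 j).foldl (fun c i =>
        if PySem.Int.mod (PySem.List.pyGetD arr j 0) (PySem.List.pyGetD arr i 0) = 0 then c + 1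
        else c) 0]) []) = (PySem.List.pyRange 0 (PySem.List.len arr)).map (pvDp arr) := by
    rw [PySem.List.foldl_append_singleton_eq_map (fun j => (PySem.List.pyRange 0 j).foldl (fun c i =>
        if PySem.Int.mod (PySem.List.pyGetD arr j 0) (PySem.List.pyGetD arr i 0) = 0 then c + 1
        else c) 0)]
    simp only [List.nil_append]
    apply List.map_congr_left
    intro j _
    rw [PySem.List.foldl_congr_mem _ _ (fun c i => if pvCond arr i j = true then c + 1 else c) 0
        (by intro acc i _
            dsimp only
            by_cases h : PySem.Int.mod (PySem.List.pyGetD arr j 0) (PySem.List.pyGetD arr i 0) = 0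
            · rw [if_pos h, if_pos (by simp [pvCond, h])]
            · rw [if_neg h, if_neg (by simp [pvCond, h])]),
        PySem.List.foldl_count_if]
    simp [pvDp]
  rw [hdp]
  rw [PySem.List.foldl_congr_mem _ _ (fun total k =>
      total + ((PySem.List.pyRange 0 k).map (fun j =>
        if pvCond arr j k = true then pvDp arr j else 0)).sum) 0 ?_]
  · rw [PySem.List.foldl_add]; simp
  · intro acc k hk
    rw [PySem.List.foldl_congr_mem _ _ (fun total j =>
        total + (if pvCond arr j k = true then pvDp arr j else 0)) acc ?_]
    · rw [PySem.List.foldl_add]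
    · intro t j hj
      dsimp only
      have hjk : 0 ≤ j ∧ j < k := PySem.List.mem_pyRange_one.mp hj
      have hget : PySem.List.pyGetD ((PySem.List.pyRange 0 (PySem.List.len arr)).map (pvDp arr)) j 0 = pvDp arr j := by
        have hlen : PySem.List.len arr = ((arr.length : Nat) : Int) := rfl
        have hkn : 0 ≤ k ∧ k < PySem.List.len arr := PySem.List.mem_pyRange_one.mp hk
        rw [hlen, show j = ((j.toNat : Nat) : Int) from (Int.toNat_of_nonneg hjk.1).symm,
            PySem.List.pyGetD_map_pyRange (pvDp arr) arr.length j.toNat 0 (by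
              rw [hlen] at hkn; omega)]
      by_cases h : pvCond arr j k = true
      · have h' : PySem.Int.mod (PySem.List.pyGetD arr k 0) (PySem.List.pyGetD arr j 0) = 0 := by
          simpa [pvCond] using h
        rw [if_pos h', if_pos h, hget]
      · have h' : ¬ PySem.Int.mod (PySem.List.pyGetD arr k 0) (PySem.List.pyGetD arr j 0) = 0 := by
          simpa [pvCond] using h
        rw [if_neg h', if_neg h, add_zero]

lemma pv_sum_filter_map (p : Int → Bool) (h : Int → Int) (l : List Int) :
    ((l.filter p).map h).sum = (l.map fun x => if p x then h x else 0).sum := by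
  induction l with
  | nil => rfl
  | cons x xs ih => by_cases hp : p x <;> simp [hp, ih]

-- a python-range list sum is a Finset.Ico sum over ℤ
lemma pv_sum_pyRange (f : Int → Int) (a b : Int) :
    ((PySem.List.pyRange a b).map f).sum = ∑ c ∈ Finset.Ico a b, f c := by
  by_cases h : a < b
  · rw [PySem.List.pyRange_one_cons h, List.map_cons, List.sum_cons,
        pv_sum_pyRange f (a+1) b,
        show Finset.Ico (a+1) b = Finset.Ioo a b from by ext x; simp,
        ← Finset.Ioo_insert_left h, Finset.sum_insert (by simp)]
  · have h1 : PySem.List.pyRange a b = [] := by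
      cases hx : PySem.List.pyRange a b with
      | nil => rfl
      | cons y ys =>
        exact absurd (PySem.List.mem_pyRange_one.mp
          (show y ∈ PySem.List.pyRange a b by simp [hx])) (by omega)
    rw [h1, Finset.Ico_eq_empty (by simpa using h)]; simp
termination_by (b - a).toNat
decreasing_by omega

lemma pv_filter_Ico (n c : Int) (hc : 0 ≤ c) :
    (Finset.Ico (0:ℤ) n).filter (fun x => c < x) = Finset.Ico (c+1) n := by
  ext x; simp [Finset.mem_Ico]; omega

lemma pv_filter_Ico' (n j : Int) (hj : j ≤ n) :
    (Finset.Ico (0:ℤ) n).filter (fun x => x < j) = Finset.Ico 0 j := by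
  ext x; simp [Finset.mem_Ico]; omega

-- the sum over an edge list as a weighted sum over all indices
lemma pv_sum_w_right (arr : List Int) (h : Int → Int) (j : Int) (hj : 0 ≤ j) :
    ((pvE arr j).map h).sum = ∑ c ∈ Finset.Ico (0:ℤ) (PySem.List.len arr), pvW arr j c * h c := by
  rw [pvE, pv_sum_filter_map, pv_sum_pyRange, ← pv_filter_Ico _ j hj, Finset.sum_filter]
  apply Finset.sum_congr rfl
  intro c _
  by_cases h1 : j < c
  · by_cases h2 : pvCond arr j c = true
    · simp [pvW, h1, h2]
    · simp [pvW, h1, h2]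
  · simp [pvW, h1]

lemma pv_len_pvE (arr : List Int) (c : Int) (hc : 0 ≤ c) :
    PySem.List.len (pvE arr c) = ∑ m ∈ Finset.Ico (0:ℤ) (PySem.List.len arr), pvW arr c m := by
  have h := pv_sum_w_right arr (fun _ => 1) c hc
  simp only [mul_one] at h
  rw [← h]
  simp [PySem.List.len, List.map_const', List.sum_replicate]

lemma pv_dp_sum (arr : List Int) (j : Int) (_hj : 0 ≤ j) (hj2 : j ≤ PySem.List.len arr) :
    pvDp arr j = ∑ i ∈ Finset.Ico (0:ℤ) (PySem.List.len arr), pvW arr i j := by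
  rw [pvDp, ← PySem.List.sum_map_ite_one_zero, pv_sum_pyRange, ← pv_filter_Ico' _ j hj2,
      Finset.sum_filter]
  apply Finset.sum_congr rfl
  intro i _
  by_cases h1 : i < j
  · by_cases h2 : pvCond arr i j = true
    · simp [pvW, h1, h2]
    · simp [pvW, h1, h2]
  · simp [pvW, h1]

-- the double-counting core: both nested sums equal Σ indeg(c) · outdeg(c)
lemma pv_sums_eq (arr : List Int) :
    ((PySem.List.pyRange 0 (PySem.List.len arr)).map (fun node =>
      ((pvE arr node).map (fun child => PySem.List.len (pvE arr child))).sum)).sum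
    = ((PySem.List.pyRange 0 (PySem.List.len arr)).map (fun k =>
      ((PySem.List.pyRange 0 k).map (fun j =>
        if pvCond arr j k = true then pvDp arr j else 0)).sum)).sum := by
  set n := PySem.List.len arr with hn
  rw [pv_sum_pyRange, pv_sum_pyRange]
  have hL : ∑ node ∈ Finset.Ico (0:ℤ) n, ((pvE arr node).map (fun child => PySem.List.len (pvE arr child))).sum
      = ∑ node ∈ Finset.Ico (0:ℤ) n, ∑ c ∈ Finset.Ico (0:ℤ) n, pvW arr node c * PySem.List.len (pvE arr c) := by
    apply Finset.sum_congr rfl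
    intro node hnode
    exact pv_sum_w_right arr _ node (Finset.mem_Ico.mp hnode).1
  have hR : ∑ k ∈ Finset.Ico (0:ℤ) n, ((PySem.List.pyRange 0 k).map (fun j =>
        if pvCond arr j k = true then pvDp arr j else 0)).sum
      = ∑ k ∈ Finset.Ico (0:ℤ) n, ∑ j ∈ Finset.Ico (0:ℤ) n, pvW arr j k * pvDp arr j := by
    apply Finset.sum_congr rfl
    intro k hk
    have hk' := Finset.mem_Ico.mp hk
    rw [pv_sum_pyRange, ← pv_filter_Ico' n k (le_of_lt hk'.2), Finset.sum_filter]
    apply Finset.sum_congr rfl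
    intro j _
    by_cases h1 : j < k
    · by_cases h2 : pvCond arr j k = true
      · simp [pvW, h1, h2]
      · simp [pvW, h1, h2]
    · simp [pvW, h1]
  rw [hL, hR]
  have hlen : ∀ c ∈ Finset.Ico (0:ℤ) n, PySem.List.len (pvE arr c) = ∑ m ∈ Finset.Ico (0:ℤ) n, pvW arr c m := by
    intro c hc; exact pv_len_pvE arr c (Finset.mem_Ico.mp hc).1
  have hdp : ∀ j ∈ Finset.Ico (0:ℤ) n, pvDp arr j = ∑ i ∈ Finset.Ico (0:ℤ) n, pvW arr i j := by
    intro j hj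
    have hj' := Finset.mem_Ico.mp hj
    exact pv_dp_sum arr j hj'.1 (le_of_lt hj'.2)
  calc ∑ node ∈ Finset.Ico (0:ℤ) n, ∑ c ∈ Finset.Ico (0:ℤ) n, pvW arr node c * PySem.List.len (pvE arr c)
      = ∑ c ∈ Finset.Ico (0:ℤ) n, ∑ node ∈ Finset.Ico (0:ℤ) n, pvW arr node c * PySem.List.len (pvE arr c) := Finset.sum_comm
    _ = ∑ c ∈ Finset.Ico (0:ℤ) n, (∑ node ∈ Finset.Ico (0:ℤ) n, pvW arr node c) * PySem.List.len (pvE arr c) := by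
        apply Finset.sum_congr rfl; intro c _; rw [Finset.sum_mul]
    _ = ∑ c ∈ Finset.Ico (0:ℤ) n, pvDp arr c * PySem.List.len (pvE arr c) := by
        apply Finset.sum_congr rfl; intro c hc; rw [hdp c hc]
    _ = ∑ c ∈ Finset.Ico (0:ℤ) n, (∑ m ∈ Finset.Ico (0:ℤ) n, pvW arr c m) * pvDp arr c := by
        apply Finset.sum_congr rfl; intro c hc; rw [hlen c hc, mul_comm]
    _ = ∑ c ∈ Finset.Ico (0:ℤ) n, ∑ m ∈ Finset.Ico (0:ℤ) n, pvW arr c m * pvDp arr c := by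
        apply Finset.sum_congr rfl; intro c _; rw [Finset.sum_mul]
    _ = ∑ m ∈ Finset.Ico (0:ℤ) n, ∑ c ∈ Finset.Ico (0:ℤ) n, pvW arr c m * pvDp arr c := Finset.sum_comm

-- ===== VERDICT (by name: the statement is the Claim_ definition above) =====
theorem solution_spec : Claim_equal_solution := by
  intro arr _ _
  unfold Spec_solution
  rw [pv_A_sum, pv_B_sum, pv_sums_eq]
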